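-- pv_equiv track=rewrite | github.com/Jose-Delgadillo/IA_Practica2_Enfoques | Enfoque Probabilidad/Redes Neuronales/0008_Hamming_Hopfield_Hebb_Boltzmann.py | hopfield_predict
-- ===== SOURCE A (Python) =====
-- def hopfield_predict(W, x, max_iter=10):
--     n = len(x)
--     y = x[:]
--     for _ in range(max_iter):
--         for i in range(n):
--             suma = sum(W[i][j] * y[j] for j in range(n))
--             y[i] = 1 if suma >= 0 else -1
--     return y
-- ===== SOURCE B (Python) =====
-- def hopfield_predict(W, x, max_iter=10):
--     y = x[:]
--     if max_iter <= 0: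
--         return y
--     n = len(x)
--     # running field: h[k] = sum_j W[k][j] * y[j], maintained incrementally
--     h = [sum(W[k][j] * y[j] for j in range(n)) for k in range(n)]
--     for _ in range(max_iter):
--         for i in range(n):
--             new = 1 if h[i] >= 0 else -1
--             if new != y[i]:
--                 d = new - y[i]
--                 for k in range(n):
--                     h[k] += W[k][i] * d
--                 y[i] = new
--     return y
-- ===== Notes on version B (the rewrite author's own statement) =====
-- stated objective: faster
-- what changed: B maintains a running field vector h (h[k] = dot of row k of W with current y) updated incrementally only when a neuron flips, instead of recomputing the full dot product for every neuron in every sweep; an early return skips the setup when max_iter <= 0.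
import Mathlib
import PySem

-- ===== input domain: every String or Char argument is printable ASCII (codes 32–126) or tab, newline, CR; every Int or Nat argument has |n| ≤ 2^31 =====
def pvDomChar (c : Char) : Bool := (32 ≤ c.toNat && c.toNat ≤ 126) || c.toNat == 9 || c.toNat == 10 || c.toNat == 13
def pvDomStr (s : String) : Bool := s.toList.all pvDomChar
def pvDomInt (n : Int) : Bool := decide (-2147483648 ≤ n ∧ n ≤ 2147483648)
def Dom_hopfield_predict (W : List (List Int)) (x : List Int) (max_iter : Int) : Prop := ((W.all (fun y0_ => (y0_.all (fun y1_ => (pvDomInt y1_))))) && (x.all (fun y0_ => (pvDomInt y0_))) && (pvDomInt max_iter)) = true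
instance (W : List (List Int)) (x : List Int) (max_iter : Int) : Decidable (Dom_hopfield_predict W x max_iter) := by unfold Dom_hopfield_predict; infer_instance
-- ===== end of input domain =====

-- B maintains the field vector h[k] = Σ_j W[k][j]*y[j] incrementally (updated only when a
-- neuron flips) instead of recomputing each neuron's dot product in every sweep; return
-- values agree exactly on Pre_ (integer weights, no rounding involved).

-- ===== PORT A =====
-- suma = sum(W[i][j] * y[j] for j in range(n)); indices are in range on Pre_, getD 0 is the safe read
def pvField (W : List (List Int)) (y : List Int) (i n : Nat) : Int :=
  (List.range n).foldl (fun acc j => acc + ((W.getD i []).getD j 0) * (y.getD j 0)) 0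

-- body of A's inner loop: y[i] = 1 if suma >= 0 else -1
def pvStepA (W : List (List Int)) (n : Nat) (y : List Int) (i : Nat) : List Int :=
  y.set i (if 0 ≤ pvField W y i n then 1 else -1)

-- range(max_iter) is empty for max_iter ≤ 0, exactly List.range max_iter.toNat
def hopfield_predict (W : List (List Int)) (x : List Int) (max_iter : Int) : List Int :=
  let n := x.length
  (List.range max_iter.toNat).foldl (fun y _ => (List.range n).foldl (pvStepA W n) y) x

-- ===== PORT B =====
-- body of B's inner loop on the state (y, h): flip-and-patch
def pvStepB (W : List (List Int)) (n : Nat) (s : List Int × List Int) (i : Nat) :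
    List Int × List Int :=
  let new : Int := if 0 ≤ s.2.getD i 0 then 1 else -1
  if new ≠ s.1.getD i 0 then
    let d := new - s.1.getD i 0
    let h' := (List.range n).foldl
      (fun h k => h.set k (h.getD k 0 + ((W.getD k []).getD i 0) * d)) s.2
    (s.1.set i new, h')
  else s

def hopfield_predict_alt (W : List (List Int)) (x : List Int) (max_iter : Int) : List Int :=
  let y := x
  if max_iter ≤ 0 then y
  else
    let n := x.length
    let h := (List.range n).map (fun k => pvField W y k n)
    ((List.range max_iter.toNat).foldl
      (fun s _ => (List.range n).foldl (pvStepB W n) s) (y, h)).1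

-- ===== PRECONDITION & SPEC =====
-- Pre_ excludes exactly the inputs where Python A raises IndexError: whenever at least one
-- sweep over a nonempty x runs, W must have ≥ len(x) rows and each accessed row ≥ len(x) entries.
def Pre_hopfield_predict (W : List (List Int)) (x : List Int) (max_iter : Int) : Prop :=
  (0 < max_iter ∧ x ≠ []) →
    (x.length ≤ W.length ∧ ∀ row ∈ W.take x.length, x.length ≤ row.length)
instance (W : List (List Int)) (x : List Int) (max_iter : Int) :
    Decidable (Pre_hopfield_predict W x max_iter) := by
  unfold Pre_hopfield_predict; infer_instance

def pvWitness_hopfield_predict : List (List Int) × List Int × Int :=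
  ([[1, 0], [0, 1]], [1, -1], 3)

def Spec_hopfield_predict (W : List (List Int)) (x : List Int) (max_iter : Int) (out : List Int) : Prop := out = hopfield_predict_alt W x max_iter
instance (W : List (List Int)) (x : List Int) (max_iter : Int) (out : List Int) : Decidable (Spec_hopfield_predict W x max_iter out) := by unfold Spec_hopfield_predict; infer_instance

-- ===== CLAIM (what is proved, stated in full; the proofs are below) =====
def Claim_equal_hopfield_predict : Prop := ∀ (W : List (List Int)) (x : List Int) (max_iter : Int), Dom_hopfield_predict W x max_iter → Pre_hopfield_predict W x max_iter → Spec_hopfield_predict W x max_iter (hopfield_predict W x max_iter)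

-- ===== LEMMAS AND PROOFS =====

-- the invariant relating B's state (y, h) to A's state y
def pvInv (W : List (List Int)) (n : Nat) (y h : List Int) : Prop :=
  y.length = n ∧ h.length = n ∧ ∀ k, k < n → h.getD k 0 = pvField W y k n

lemma pvFoldl_add (f : Nat → Int) (n : Nat) (a : Int) :
    (List.range n).foldl (fun acc j => acc + f j) a = a + ∑ j ∈ Finset.range n, f j := by
  induction n generalizing a with
  | zero => simp
  | succ m ih => simp [List.range_succ, Finset.sum_range_succ, ih, add_assoc]

lemma pvField_sum (W : List (List Int)) (y : List Int) (i n : Nat) :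
    pvField W y i n = ∑ j ∈ Finset.range n, ((W.getD i []).getD j 0) * (y.getD j 0) := by
  simpa using pvFoldl_add (fun j => ((W.getD i []).getD j 0) * (y.getD j 0)) n 0

lemma pvGetD_set (l : List Int) (i j : Nat) (v : Int) :
    (l.set i v).getD j 0 = if i = j ∧ i < l.length then v else l.getD j 0 := by
  simp only [List.getD_eq_getElem?_getD, List.getElem?_set]
  by_cases h1 : i = j
  · subst h1
    by_cases h2 : i < l.length
    · simp [h2]
    · simp [h2]
  · simp [h1]

lemma pvField_set (W : List (List Int)) (y : List Int) (k i n : Nat) (v : Int)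
    (hi : i < n) (hy : y.length = n) :
    pvField W (y.set i v) k n
      = pvField W y k n + ((W.getD k []).getD i 0) * (v - y.getD i 0) := by
  have hset : ∀ j, ((W.getD k []).getD j 0) * ((y.set i v).getD j 0)
      = ((W.getD k []).getD j 0) * (y.getD j 0)
        + (if j = i then ((W.getD k []).getD i 0) * (v - y.getD i 0) else 0) := by
    intro j
    rw [pvGetD_set]
    by_cases hji : j = i
    · subst hji
      simp [hy, hi, mul_sub]
    · simp [Ne.symm hji, hji]
  rw [pvField_sum, pvField_sum]
  simp only [hset]
  rw [Finset.sum_add_distrib, Finset.sum_ite_eq' (Finset.range n) i]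
  simp [Finset.mem_range.mpr hi]

-- length and pointwise characterisation of B's h-patching foldl
lemma pvUpd_length (c : Nat → Int) (n : Nat) (h : List Int) :
    ((List.range n).foldl (fun h k => h.set k (h.getD k 0 + c k)) h).length = h.length := by
  induction n with
  | zero => simp
  | succ m ih =>
    rw [List.range_succ, List.foldl_append]
    simp only [List.foldl_cons, List.foldl_nil, List.length_set]
    exact ih

lemma pvUpd_getD (c : Nat → Int) (n : Nat) (h : List Int) (m : Nat) (hn : n ≤ h.length) :
    ((List.range n).foldl (fun h k => h.set k (h.getD k 0 + c k)) h).getD m 0 =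
      if m < n then h.getD m 0 + c m else h.getD m 0 := by
  induction n with
  | zero => simp
  | succ p ih =>
    rw [List.range_succ, List.foldl_append]
    simp only [List.foldl_cons, List.foldl_nil]
    rw [pvGetD_set, pvUpd_length]
    have hp := ih (Nat.le_of_succ_le hn)
    by_cases he : p = m
    · subst he
      have hlt : p < h.length := Nat.lt_of_succ_le hn
      rw [if_pos ⟨rfl, hlt⟩, hp, if_neg (lt_irrefl p), if_pos (Nat.lt_succ_self p)]
    · have hne : ¬ (p = m ∧ p < h.length) := fun hc => he hc.1
      rw [if_neg hne, hp]
      by_cases hm2 : m < p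
      · simp [hm2, Nat.lt_succ_of_lt hm2]
      · have h3 : ¬ m < p + 1 := by omega
        simp [hm2, h3]

lemma pvStep_equiv (W : List (List Int)) (n : Nat) (y h : List Int) (i : Nat)
    (hi : i < n) (hinv : pvInv W n y h) :
    (pvStepB W n (y, h) i).1 = pvStepA W n y i ∧
      pvInv W n (pvStepB W n (y, h) i).1 (pvStepB W n (y, h) i).2 := by
  obtain ⟨hyl, hhl, hf⟩ := hinv
  have hfi := hf i hi
  by_cases hne : (if 0 ≤ pvField W y i n then (1 : Int) else -1) ≠ y.getD i 0
  · have hB : pvStepB W n (y, h) i =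
        (y.set i (if 0 ≤ pvField W y i n then (1 : Int) else -1),
          (List.range n).foldl
            (fun h k => h.set k (h.getD k 0 +
              ((W.getD k []).getD i 0) *
                ((if 0 ≤ pvField W y i n then (1 : Int) else -1) - y.getD i 0))) h) := by
      simp only [pvStepB, hfi]
      rw [if_pos hne]
    rw [hB]
    refine ⟨rfl, by simpa using hyl, by rw [pvUpd_length]; exact hhl, ?_⟩
    intro k hk
    rw [pvUpd_getD _ n h k (by omega), if_pos hk, hf k hk,
      pvField_set W y k i n _ hi hyl]
  · rw [not_not] at hne
    have hB : pvStepB W n (y, h) i = (y, h) := by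
      simp only [pvStepB, hfi]
      rw [if_neg (by simp [hne])]
    have hA : pvStepA W n y i = y := by
      have hil : i < y.length := hyl ▸ hi
      have hg : y.getD i 0 = y[i] := by
        simp [List.getD_eq_getElem?_getD, List.getElem?_eq_getElem hil]
      rw [pvStepA.eq_def, hne, hg, List.set_getElem_self]
    rw [hB, hA]
    exact ⟨rfl, hyl, hhl, hf⟩

lemma pvInner_equiv (W : List (List Int)) (n : Nat) (l : List Nat)
    (hl : ∀ i ∈ l, i < n) (y h : List Int) (hinv : pvInv W n y h) :
    (l.foldl (pvStepB W n) (y, h)).1 = l.foldl (pvStepA W n) y ∧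
      pvInv W n (l.foldl (pvStepB W n) (y, h)).1 (l.foldl (pvStepB W n) (y, h)).2 := by
  induction l generalizing y h with
  | nil => exact ⟨rfl, hinv⟩
  | cons a t ih =>
    have ha := hl a (List.mem_cons_self ..)
    obtain ⟨h1, h2⟩ := pvStep_equiv W n y h a ha hinv
    rcases hs : pvStepB W n (y, h) a with ⟨y', h'⟩
    rw [hs] at h1 h2
    simp only [List.foldl_cons, hs, ← h1]
    exact ih (fun i hi => hl i (List.mem_cons_of_mem _ hi)) y' h' h2

lemma pvOuter_equiv (W : List (List Int)) (n : Nat) (l : List Nat) (y h : List Int)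
    (hinv : pvInv W n y h) :
    (l.foldl (fun s _ => (List.range n).foldl (pvStepB W n) s) (y, h)).1 =
      l.foldl (fun y _ => (List.range n).foldl (pvStepA W n) y) y := by
  induction l generalizing y h with
  | nil => rfl
  | cons a t ih =>
    obtain ⟨h1, h2⟩ := pvInner_equiv W n (List.range n) (by simp) y h hinv
    rcases hs : (List.range n).foldl (pvStepB W n) (y, h) with ⟨y', h'⟩
    rw [hs] at h1 h2
    simp only [List.foldl_cons, hs, ← h1]
    exact ih y' h' h2

lemma pvInit_inv (W : List (List Int)) (x : List Int) :
    pvInv W x.length x ((List.range x.length).map (fun k => pvField W x k x.length)) := by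
  refine ⟨rfl, by simp, ?_⟩
  intro k hk
  simp [List.getD_eq_getElem?_getD, List.getElem?_map, List.getElem?_range hk]

-- ===== VERDICT (by name: the statement is the Claim_ definition above) =====
theorem hopfield_predict_spec : Claim_equal_hopfield_predict := by
  intro W x max_iter _ _
  unfold Spec_hopfield_predict hopfield_predict hopfield_predict_alt
  by_cases hm : max_iter ≤ 0
  · have : max_iter.toNat = 0 := Int.toNat_of_nonpos hm
    simp [hm, this]
  · simp only [hm, if_false]
    exact (pvOuter_equiv W x.length (List.range max_iter.toNat) x _ (pvInit_inv W x)).symm
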